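-- pv_equiv track=rewrite | github.com/jerodway/open-semantic-etl | src/opensemanticetl/enhance_serving_mapping.py | serving_mapping
-- ===== SOURCE A (Python) =====
-- def serving_mapping(value, mappings=None):
--     if mappings is None:
--         mappings = {}
--
--     max_match_len = -1
--
--     # check all mappings for matching and use the best
--     for map_from, map_to in mappings.items():
--
--         # map from matching value?
--         if value.startswith(map_from):
--
--             # if from string longer (deeper path), this is the better matching
--             match_len = len(map_from)
--
--             if match_len > max_match_len:
--                 max_match_len = match_len
--                 best_match_map_from = map_from
--                 best_match_map_to = map_to
--
--     # if there is a match, replace first occurance of value with mapping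
--     if max_match_len >= 0:
--         value = value.replace(best_match_map_from, best_match_map_to, 1)
--
--     return value
-- ===== SOURCE B (Python) =====
-- def serving_mapping(value, mappings=None):
--     if mappings is None:
--         mappings = {}
--
--     # Try candidate prefixes longest-first (stable sort keeps dict order on ties);
--     # the first key that is a prefix of value is the best match.
--     for k in sorted(mappings, key=len, reverse=True):
--         if value.startswith(k):
--             return mappings[k] + value[len(k):]
--
--     return value
-- ===== Notes on version B (the rewrite author's own statement) =====
-- stated objective: alternative
-- what changed: A scans all mapping keys tracking the maximum matching prefix length; B instead sorts the keys by length in descending order (stable) and returns on the first key that is a prefix of value, replacing that prefix by concatenation.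
import Mathlib
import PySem

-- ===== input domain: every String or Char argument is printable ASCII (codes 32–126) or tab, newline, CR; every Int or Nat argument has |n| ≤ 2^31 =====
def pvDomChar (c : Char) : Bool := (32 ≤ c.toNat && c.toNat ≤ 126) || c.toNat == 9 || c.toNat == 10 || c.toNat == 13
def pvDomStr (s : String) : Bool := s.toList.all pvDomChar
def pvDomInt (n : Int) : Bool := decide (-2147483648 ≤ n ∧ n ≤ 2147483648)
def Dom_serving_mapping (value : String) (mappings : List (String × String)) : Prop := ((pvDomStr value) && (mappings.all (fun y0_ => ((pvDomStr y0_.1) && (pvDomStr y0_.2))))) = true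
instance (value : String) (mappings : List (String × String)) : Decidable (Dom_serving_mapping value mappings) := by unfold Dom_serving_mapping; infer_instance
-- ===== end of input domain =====

-- B replaces A's scan-all/track-max-length loop by sorting the keys by length
-- descending (stable) and taking the first key that is a prefix of value
-- (objective: alternative decomposition, not claimed faster).

-- ===== PORT A =====
-- hand port of Python's s.replace(old, new, 1): replaces the FIRST occurrence of
-- old (if any); exact, including old = "" (inserts new at the front).
def pvReplaceOnce (s old new : List Char) : List Char :=
  if PySem.Chars.isIn old s then
    let i := (PySem.Chars.find s old).toNat
    s.take i ++ new ++ s.drop (i + old.length)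
  else s

-- the body of A's 'for map_from, map_to in mappings.items()' loop
def pvStepA (value : String) (acc : Int × String × String) (q : String × String) : Int × String × String :=
  if PySem.Str.startswith value q.1 then
    if PySem.Str.len q.1 > acc.1 then (PySem.Str.len q.1, q.1, q.2) else acc
  else acc

def serving_mapping (value : String) (mappings : List (String × String)) : String :=
  -- state: (max_match_len, best_match_map_from, best_match_map_to); "" = unset
  let st := mappings.foldl (pvStepA value) (-1, "", "")
  if st.1 ≥ 0 then String.ofList (pvReplaceOnce value.toList st.2.1.toList st.2.2.toList)
  else value

-- ===== PORT B =====
-- B's 'for k in sorted(mappings, key=len, reverse=True): …' loop with early return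
def pvAltGo (value : String) (mappings : List (String × String)) : List String → String
  | [] => value
  | k :: rest =>
    if PySem.Str.startswith value k then
      match List.lookup k mappings with
      | some t => t ++ PySem.Str.slice value (some (PySem.Str.len k)) none
      | none => value   -- unreachable: k is drawn from mappings' keys
    else pvAltGo value mappings rest

def serving_mapping_alt (value : String) (mappings : List (String × String)) : String :=
  pvAltGo value mappings (PySem.List.sorted (mappings.map Prod.fst) (fun k => PySem.Str.len k) true)

-- ===== PRECONDITION & SPEC =====
def Spec_serving_mapping (value : String) (mappings : List (String × String)) (out : String) : Prop := out = serving_mapping_alt value mappings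
instance (value : String) (mappings : List (String × String)) (out : String) : Decidable (Spec_serving_mapping value mappings out) := by unfold Spec_serving_mapping; infer_instance

-- ===== CLAIM (what is proved, stated in full; the proofs are below) =====
def Claim_equal_serving_mapping : Prop := ∀ (value : String) (mappings : List (String × String)), Dom_serving_mapping value mappings → Spec_serving_mapping value mappings (serving_mapping value mappings)

-- ===== LEMMAS AND PROOFS =====

-- proof-only abbreviations
def pvP (value k : String) : Bool := PySem.Str.startswith value k

def pvBStep (value : String) (acc : Option String) (k : String) : Option String :=
  match acc with
  | none => if pvP value k then some k else none
  | some b => if pvP value k && decide (PySem.Str.len b < PySem.Str.len k) then some k else some b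

def pvProj (st : Int × String × String) : Option String :=
  if st.1 < 0 then none else some st.2.1

def pvInv (value : String) (pre : List (String × String)) (st : Int × String × String) : Prop :=
  (st.1 < 0 ∧ ∀ q ∈ pre, pvP value q.1 = false) ∨
  (0 ≤ st.1 ∧ st.1 = PySem.Str.len st.2.1 ∧ pvP value st.2.1 = true ∧
   List.lookup st.2.1 pre = some st.2.2 ∧
   ∀ q ∈ pre, pvP value q.1 = true → PySem.Str.len q.1 ≤ st.1)

theorem pv_len_nonneg (s : String) : (0 : Int) ≤ PySem.Str.len s := by
  rw [PySem.Str.len_eq]; exact Int.natCast_nonneg _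

theorem pv_lookup_none {l : List (String × String)} {k : String}
    (h : ∀ q ∈ l, q.1 ≠ k) : List.lookup k l = none := by
  induction l with
  | nil => rfl
  | cons q l ih =>
    have hq : (k == q.1) = false := by
      have := h q (by simp)
      simp [beq_eq_false_iff_ne]
      exact fun he => this he.symm
    simp only [List.lookup, hq]
    exact ih (fun r hr => h r (by simp [hr]))

theorem pv_insertBy_cons_of_true {b : String → String → Bool} {x y : String} {ys : List String}
    (h : b x y = true) : PySem.List.insertBy b x (y :: ys) = x :: y :: ys := by
  show (if b x y then _ else _) = _
  rw [h]; simp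

theorem pv_insertBy_cons_of_false {b : String → String → Bool} {x y : String} {ys : List String}
    (h : b x y = false) :
    PySem.List.insertBy b x (y :: ys) = y :: PySem.List.insertBy b x ys := by
  show (if b x y then _ else _) = _
  rw [h]; simp

-- find? through one stable insertion into a length-descending list
theorem pv_find?_insertBy (value x : String) (s : List String)
    (hs : s.Pairwise (fun a b => PySem.Str.len b ≤ PySem.Str.len a)) :
    List.find? (pvP value)
      (PySem.List.insertBy (fun a b => decide (PySem.Str.len b < PySem.Str.len a)) x s)
      = pvBStep value (List.find? (pvP value) s) x := by
  induction s with
  | nil =>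
    cases hx : pvP value x <;> simp [PySem.List.insertBy, pvBStep, List.find?, hx]
  | cons y ys ih =>
    have hy : ∀ z ∈ ys, PySem.Str.len z ≤ PySem.Str.len y := (List.pairwise_cons.mp hs).1
    have hys := (List.pairwise_cons.mp hs).2
    by_cases hb : PySem.Str.len y < PySem.Str.len x
    · -- x goes in front
      rw [pv_insertBy_cons_of_true (by simpa using hb)]
      cases hx : pvP value x
      · rw [List.find?_cons_of_neg (by simp [hx])]
        cases hf : List.find? (pvP value) (y :: ys) <;> simp [pvBStep, hx]
      · rw [List.find?_cons_of_pos hx]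
        cases hf : List.find? (pvP value) (y :: ys) with
        | none => simp [pvBStep, hx]
        | some k =>
          have hk : k ∈ y :: ys := List.mem_of_find?_eq_some hf
          have hkx : PySem.Str.len k < PySem.Str.len x := by
            rcases List.mem_cons.mp hk with h | h
            · rw [h]; exact hb
            · exact lt_of_le_of_lt (hy k h) hb
          show some x = if pvP value x && decide (PySem.Str.len k < PySem.Str.len x) then some x else some k
          rw [hx, decide_eq_true hkx]
          simp
    · -- x goes behind y
      rw [pv_insertBy_cons_of_false (by simpa using hb)]
      cases hpy : pvP value y
      · rw [List.find?_cons_of_neg (by simp [hpy]), List.find?_cons_of_neg (by simp [hpy]),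
          ih hys]
      · rw [List.find?_cons_of_pos hpy, List.find?_cons_of_pos hpy]
        show some y = if pvP value x && decide (PySem.Str.len y < PySem.Str.len x) then some x else some y
        rw [decide_eq_false hb, Bool.and_false]
        simp

-- find? over the reverse-sorted list is the running-best fold over the unsorted keys
theorem pv_find?_sorted_aux (value : String) : ∀ (l ys : List String),
    List.find? (pvP value)
      (List.foldl (fun acc x => PySem.List.insertBy (fun a b => decide ((fun k => PySem.Str.len k) b < (fun k => PySem.Str.len k) a)) x acc)
        (PySem.List.sorted ys (fun k => PySem.Str.len k) true) l)
      = List.foldl (pvBStep value)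
          (List.find? (pvP value) (PySem.List.sorted ys (fun k => PySem.Str.len k) true)) l := by
  intro l
  induction l with
  | nil => intro ys; simp
  | cons x l ih =>
    intro ys
    have h1 : PySem.List.insertBy (fun a b => decide (PySem.Str.len b < PySem.Str.len a)) x
        (PySem.List.sorted ys (fun k => PySem.Str.len k) true)
        = PySem.List.sorted (ys ++ [x]) (fun k => PySem.Str.len k) true := by
      rw [PySem.List.sorted_rev_eq_foldl_insertBy, PySem.List.sorted_rev_eq_foldl_insertBy,
        List.foldl_append]
      simp
    simp only [List.foldl_cons]
    rw [h1, ih (ys ++ [x]), ← h1,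
      pv_find?_insertBy value x _ (PySem.List.sorted_pairwise_rev ys (fun k => PySem.Str.len k))]

theorem pv_find?_sorted (value : String) (ks : List String) :
    List.find? (pvP value) (PySem.List.sorted ks (fun k => PySem.Str.len k) true)
      = List.foldl (pvBStep value) none ks := by
  have h0 : PySem.List.sorted ([] : List String) (fun k => PySem.Str.len k) true = [] := by
    rw [PySem.List.sorted_rev_eq_foldl_insertBy]; rfl
  have h := pv_find?_sorted_aux value ks []
  rw [h0] at h
  rw [PySem.List.sorted_rev_eq_foldl_insertBy]
  simpa using h

-- B's loop is a find? followed by a lookup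
theorem pvAltGo_eq (value : String) (mappings : List (String × String)) (ks : List String) :
    pvAltGo value mappings ks =
      match List.find? (pvP value) ks with
      | none => value
      | some k =>
        match List.lookup k mappings with
        | some t => t ++ PySem.Str.slice value (some (PySem.Str.len k)) none
        | none => value := by
  induction ks with
  | nil => rfl
  | cons k ks ih =>
    cases hk : PySem.Str.startswith value k
    · have hgo : pvAltGo value mappings (k :: ks) = pvAltGo value mappings ks := by
        show (if PySem.Str.startswith value k then _ else _) = _
        rw [hk]; simp
      have hp : pvP value k = false := hk
      rw [hgo, ih, List.find?_cons_of_neg (by simp [hp])]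
    · have hgo : pvAltGo value mappings (k :: ks)
          = match List.lookup k mappings with
            | some t => t ++ PySem.Str.slice value (some (PySem.Str.len k)) none
            | none => value := by
        show (if PySem.Str.startswith value k then _ else _) = _
        rw [hk]; simp
      rw [hgo, List.find?_cons_of_pos (show pvP value k = true from hk)]

-- the loop invariant of A's fold, together with its projection to B's running best
theorem pvFold_inv (value : String) : ∀ (l pre : List (String × String)) (st : Int × String × String),
    pvInv value pre st →
    pvInv value (pre ++ l) (List.foldl (pvStepA value) st l) ∧
    List.foldl (pvBStep value) (pvProj st) (l.map Prod.fst)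
      = pvProj (List.foldl (pvStepA value) st l) := by
  intro l
  induction l with
  | nil => intro pre st h; simpa using h
  | cons q l ih =>
    intro pre st h
    have hq0 : (0 : Int) ≤ PySem.Str.len q.1 := pv_len_nonneg q.1
    have step1 : pvInv value (pre ++ [q]) (pvStepA value st q) := by
      cases hq : PySem.Str.startswith value q.1
      · have hq' : pvP value q.1 = false := hq
        have hstep : pvStepA value st q = st := by
          show (if PySem.Str.startswith value q.1 then _ else _) = _
          rw [hq]; simp
        rw [hstep]
        rcases h with ⟨h1, h2⟩ | ⟨h1, h2, h3, h4, h5⟩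
        · refine Or.inl ⟨h1, ?_⟩
          intro r hr
          rcases List.mem_append.mp hr with hm | hm
          · exact h2 r hm
          · simp at hm; rw [hm]; exact hq'
        · refine Or.inr ⟨h1, h2, h3, ?_, ?_⟩
          · rw [List.lookup_append, h4]; rfl
          · intro r hr hpr
            rcases List.mem_append.mp hr with hm | hm
            · exact h5 r hm hpr
            · simp at hm; rw [hm] at hpr; rw [hpr] at hq'; cases hq'
      · have hq' : pvP value q.1 = true := hq
        by_cases hlt : PySem.Str.len q.1 > st.1
        · have hstep : pvStepA value st q = (PySem.Str.len q.1, q.1, q.2) := by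
            show (if PySem.Str.startswith value q.1 then _ else _) = _
            rw [hq]; simp only [if_pos hlt]; simp
          rw [hstep]
          have hnone : List.lookup q.1 pre = none := by
            apply pv_lookup_none
            intro r hr he
            rcases h with ⟨h1, h2⟩ | ⟨h1, h2, h3, h4, h5⟩
            · have hf := h2 r hr; rw [he] at hf; rw [hf] at hq'; cases hq'
            · have hle := h5 r hr (by rw [he]; exact hq')
              rw [he] at hle; omega
          refine Or.inr ⟨hq0, rfl, hq', ?_, ?_⟩
          · rw [List.lookup_append, hnone]
            simp [List.lookup]
          · intro r hr hpr
            rcases List.mem_append.mp hr with hm | hm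
            · rcases h with ⟨h1, h2⟩ | ⟨h1, h2, h3, h4, h5⟩
              · have hf := h2 r hm; rw [hpr] at hf; cases hf
              · have := h5 r hm hpr; omega
            · simp at hm; rw [hm]
        · have hstep : pvStepA value st q = st := by
            show (if PySem.Str.startswith value q.1 then _ else _) = _
            rw [hq]; simp only [if_neg hlt]; simp
          rw [hstep]
          rcases h with ⟨h1, h2⟩ | ⟨h1, h2, h3, h4, h5⟩
          · omega
          · refine Or.inr ⟨h1, h2, h3, ?_, ?_⟩
            · rw [List.lookup_append, h4]; rfl
            · intro r hr hpr
              rcases List.mem_append.mp hr with hm | hm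
              · exact h5 r hm hpr
              · simp at hm; rw [hm]; omega
    have step2 : pvBStep value (pvProj st) q.1 = pvProj (pvStepA value st q) := by
      cases hq : PySem.Str.startswith value q.1
      · have hq' : pvP value q.1 = false := hq
        have hstep : pvStepA value st q = st := by
          show (if PySem.Str.startswith value q.1 then _ else _) = _
          rw [hq]; simp
        rw [hstep]
        by_cases hneg : st.1 < 0
        · rw [show pvProj st = none from by simp [pvProj, hneg]]
          show (if pvP value q.1 then some q.1 else none) = none
          rw [hq']; simp
        · rw [show pvProj st = some st.2.1 from by simp [pvProj, hneg]]
          show (if pvP value q.1 && decide (PySem.Str.len st.2.1 < PySem.Str.len q.1) then some q.1 else some st.2.1) = some st.2.1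
          rw [hq']; simp
      · have hq' : pvP value q.1 = true := hq
        by_cases hlt : PySem.Str.len q.1 > st.1
        · have hstep : pvStepA value st q = (PySem.Str.len q.1, q.1, q.2) := by
            show (if PySem.Str.startswith value q.1 then _ else _) = _
            rw [hq]; simp only [if_pos hlt]; simp
          rw [hstep]
          have hpr : pvProj (PySem.Str.len q.1, q.1, q.2) = some q.1 := by
            show (if PySem.Str.len q.1 < 0 then none else some q.1) = some q.1
            rw [if_neg (by omega)]
          rw [hpr]
          by_cases hneg : st.1 < 0
          · rw [show pvProj st = none from by simp [pvProj, hneg]]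
            show (if pvP value q.1 then some q.1 else none) = some q.1
            rw [hq']; simp
          · rcases h with ⟨h1, _⟩ | ⟨h1, h2, _, _, _⟩
            · omega
            · rw [show pvProj st = some st.2.1 from by simp [pvProj, hneg]]
              show (if pvP value q.1 && decide (PySem.Str.len st.2.1 < PySem.Str.len q.1) then some q.1 else some st.2.1) = some q.1
              rw [hq', decide_eq_true (show PySem.Str.len st.2.1 < PySem.Str.len q.1 by omega)]
              simp
        · have hstep : pvStepA value st q = st := by
            show (if PySem.Str.startswith value q.1 then _ else _) = _
            rw [hq]; simp only [if_neg hlt]; simp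
          rw [hstep]
          rcases h with ⟨h1, _⟩ | ⟨h1, h2, _, _, _⟩
          · omega
          · rw [show pvProj st = some st.2.1 from by simp [pvProj, show ¬ st.1 < 0 by omega]]
            show (if pvP value q.1 && decide (PySem.Str.len st.2.1 < PySem.Str.len q.1) then some q.1 else some st.2.1) = some st.2.1
            rw [decide_eq_false (show ¬ PySem.Str.len st.2.1 < PySem.Str.len q.1 by omega), Bool.and_false]
            simp
    have hmain := ih (pre ++ [q]) (pvStepA value st q) step1
    constructor
    · simpa using hmain.1
    · simp only [List.map_cons, List.foldl_cons]
      rw [step2]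
      exact hmain.2

-- replacing the first occurrence of a prefix = new ++ rest
theorem pv_replace_prefix (value f t : String) (h : PySem.Str.startswith value f = true) :
    String.ofList (pvReplaceOnce value.toList f.toList t.toList)
      = t ++ PySem.Str.slice value (some (PySem.Str.len f)) none := by
  have hpre : f.toList <+: value.toList := by
    rw [PySem.Str.startswith_eq] at h
    exact (PySem.Chars.startswith_iff _ _).mp h
  have hin : PySem.Chars.isIn f.toList value.toList = true :=
    (PySem.Chars.isIn_iff_infix _ _).mpr hpre.isInfix
  have hnn : 0 ≤ PySem.Chars.find value.toList f.toList :=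
    (PySem.Chars.find_nonneg_iff _ _).mpr hpre.isInfix
  have hz : (PySem.Chars.find value.toList f.toList).toNat = 0 := by
    by_contra hne
    exact (PySem.Chars.find_spec hnn).2 0 (Nat.pos_of_ne_zero hne) (by simpa using hpre)
  have hL : pvReplaceOnce value.toList f.toList t.toList
      = t.toList ++ value.toList.drop f.toList.length := by
    simp [pvReplaceOnce, hin, hz]
  have hR : (t ++ PySem.Str.slice value (some (PySem.Str.len f)) none).toList
      = t.toList ++ value.toList.drop f.toList.length := by
    rw [String.toList_append, PySem.Str.toList_slice, PySem.Chars.slice_eq_listSlice,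
      PySem.Str.len_eq, PySem.List.slice_from _ (by positivity)]
    simp
  have hRR := congrArg String.ofList hR
  rw [String.ofList_toList] at hRR
  rw [hL, ← hRR]

-- ===== VERDICT (by name: the statement is the Claim_ definition above) =====
theorem serving_mapping_spec : Claim_equal_serving_mapping := by
  unfold Claim_equal_serving_mapping
  intro value mappings _
  unfold Spec_serving_mapping serving_mapping serving_mapping_alt
  have hinv0 : pvInv value [] (-1, "", "") := Or.inl ⟨by norm_num, by simp⟩
  obtain ⟨hinv, hproj⟩ := pvFold_inv value mappings [] (-1, "", "") hinv0
  simp only [List.nil_append] at hinv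
  rw [pvAltGo_eq, pv_find?_sorted]
  have hpn : pvProj (-1, "", "") = none := by simp [pvProj]
  rw [hpn] at hproj
  rw [hproj]
  set st := List.foldl (pvStepA value) (-1, "", "") mappings with hst
  by_cases hneg : st.1 < 0
  · simp [pvProj, hneg, show ¬ st.1 ≥ 0 by omega]
  · rcases hinv with ⟨h1, _⟩ | ⟨h1, h2, h3, h4, h5⟩
    · omega
    · simp only [pvProj, if_neg hneg]
      rw [if_pos (by omega : st.1 ≥ 0), h4]
      exact pv_replace_prefix value st.2.1 st.2.2 h3
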